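-- pv_equiv track=rewrite | github.com/AlexLence/bloc-de-syntenies | bibliotheque_plot.py | verification_bloc
-- ===== SOURCE A (Python) =====
-- def verification_bloc(liste_bloc_syn,taille_min_syn,seuil):
-- 	liste_bloc=[]#Liste final des blocs à considérer
-- 	for l in liste_bloc_syn:#Pour tous les blocs on va vérifié la distance entre chaque gène
-- 		liste=[]
-- 		prece=l[0][0]
-- 		for i in l:#Pour chaque gène dans un bloc on va vérifié sa distance avec le gène précédent
-- 			if not i[0]>(prece+seuil):#Si la distance entre deux gènes n'est pas supérieur au seuil
--                                                   #alors on incrémente la liste de ce bloc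
-- 				liste.append(i)
-- 			else:                     #Si la distance est supérieure alors on crée un nouveau bloc
--                                                   #Et on remplit la liste des blocs
-- 				liste_bloc.append(liste)
-- 				liste=[i]
-- 			prece=i[0]
-- 		liste_bloc.append(liste)
--
-- 	i=0
-- 	#On verifie que chaque bloc dans la liste des blocs a bien une taille convenable sinon on suprime le bloc
-- 	while i!=len(liste_bloc):
-- 		if len(liste_bloc[i])<taille_min_syn:
-- 			del liste_bloc[i]
-- 		else:
-- 			i+=1
-- 	return(liste_bloc)
-- ===== SOURCE B (Python) =====
-- def verification_bloc(liste_bloc_syn, taille_min_syn, seuil):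
--     resultat = []
--     for l in liste_bloc_syn:
--         n = len(l)
--         # indices where a new block starts: the gap to the previous gene exceeds seuil
--         cuts = [0]
--         cuts += [k for k in range(1, n) if l[k][0] > l[k - 1][0] + seuil]
--         cuts.append(n)
--         # slice the block at the cuts, keeping only the segments that are large enough
--         for a, b in zip(cuts, cuts[1:]):
--             if b - a >= taille_min_syn:
--                 resultat.append(l[a:b])
--     return resultat
-- ===== Notes on version B (the rewrite author's own statement) =====
-- stated objective: alternative
-- what changed: Instead of threading a growing current-segment list through the gene loop and then deleting small blocks in a separate while/del pass, B computes the break indices of each block, slices the block at those cuts and emits each slice only if it is large enough, fusing split and size-filter into one boundaries-then-slice pass.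
-- intended difference: When seuil < 0, taille_min_syn <= 0 and there is at least one block, A's initialisation prece = l[0][0] makes the first gene compare against itself and appends a phantom empty block per input block (kept because the size filter passes empty lists when taille_min_syn <= 0); B emits only the real nonempty segments, which is what the splitter is for. — e.g. on verification_bloc([[[1]]], 0, -1): A returns [[], [[1]]], B returns [[[1]]]
import Mathlib
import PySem

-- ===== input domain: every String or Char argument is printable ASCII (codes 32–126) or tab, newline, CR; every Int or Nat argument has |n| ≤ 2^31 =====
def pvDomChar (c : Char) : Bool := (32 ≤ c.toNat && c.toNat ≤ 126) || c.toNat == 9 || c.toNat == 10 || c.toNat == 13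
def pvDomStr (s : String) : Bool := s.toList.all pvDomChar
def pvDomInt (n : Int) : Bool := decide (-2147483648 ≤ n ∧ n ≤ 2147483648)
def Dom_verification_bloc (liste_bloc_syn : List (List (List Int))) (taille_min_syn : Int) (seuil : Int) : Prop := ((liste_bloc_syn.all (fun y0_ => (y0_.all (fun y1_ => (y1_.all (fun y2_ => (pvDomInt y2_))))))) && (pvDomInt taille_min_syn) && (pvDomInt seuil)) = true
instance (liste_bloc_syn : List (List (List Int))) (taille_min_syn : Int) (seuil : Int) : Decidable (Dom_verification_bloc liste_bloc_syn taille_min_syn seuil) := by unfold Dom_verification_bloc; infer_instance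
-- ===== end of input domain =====

-- B replaces A's threaded-accumulator split plus separate while/del size pass by a
-- boundaries-then-slice decomposition (compute break indices, slice, filter inline); same cost.
-- Intended difference: for seuil < 0 with taille_min_syn <= 0, A keeps a phantom empty block
-- per input block (from prece = l[0][0] self-comparison); B emits only the real segments.


-- ===== PORT A =====
-- inner gene loop of A: state (liste, prece, liste_bloc); Pre_ guarantees every indexing
-- (l[0][0], i[0]) hits a nonempty list, so headD 0 is exact there
def aBlock (seuil : Int) (l : List (List Int)) (acc : List (List (List Int))) : List (List (List Int)) :=
  let prece : Int := (l.headD []).headD 0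
  let st := l.foldl (fun (st : List (List Int) × Int × List (List (List Int))) i =>
      if ¬ (i.headD 0 > st.2.1 + seuil) then (st.1 ++ [i], i.headD 0, st.2.2)
      else ([i], i.headD 0, st.2.2 ++ [st.1])) ([], prece, acc)
  st.2.2 ++ [st.1]

-- A's trailing while/del loop: walk the list, dropping blocks smaller than taille_min_syn
def aFilter (t : Int) : List (List (List Int)) → List (List (List Int))
  | [] => []
  | b :: rest => if (b.length : Int) < t then aFilter t rest else b :: aFilter t rest

def verification_bloc (liste_bloc_syn : List (List (List Int))) (taille_min_syn : Int) (seuil : Int) : List (List (List Int)) :=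
  aFilter taille_min_syn (liste_bloc_syn.foldl (fun acc l => aBlock seuil l acc) [])

-- ===== PORT B =====
-- cut positions of Source B (indices are nonnegative and in range, so getD is exact there);
-- range(1, n) is ported as (List.range n).drop 1
def altCuts (seuil : Int) (l : List (List Int)) : List Nat :=
  [0]
    ++ ((List.range l.length).drop 1).filter
        (fun k => decide ((l.getD k []).headD 0 > (l.getD (k - 1) []).headD 0 + seuil))
    ++ [l.length]

-- the per-block slice-and-filter loop 'for a, b in zip(cuts, cuts[1:])'; l[a:b] with
-- 0 ≤ a ≤ b ≤ len l is exactly (l.drop a).take (b - a)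
def altBlock (t seuil : Int) (l : List (List Int)) (acc : List (List (List Int))) : List (List (List Int)) :=
  let cuts := altCuts seuil l
  (cuts.zip (cuts.drop 1)).foldl (fun acc p =>
      if ((p.2 : Int) - (p.1 : Int)) ≥ t then acc ++ [(l.drop p.1).take (p.2 - p.1)] else acc) acc

def verification_bloc_alt (liste_bloc_syn : List (List (List Int))) (taille_min_syn : Int) (seuil : Int) : List (List (List Int)) :=
  liste_bloc_syn.foldl (fun acc l => altBlock taille_min_syn seuil l acc) []

-- ===== PRECONDITION & SPEC =====
-- Pre_ excludes exactly the inputs on which the Python A raises IndexError: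
-- an empty block (l[0][0]) or an empty gene inside a block (i[0]).
def Pre_verification_bloc (liste_bloc_syn : List (List (List Int))) (taille_min_syn : Int) (seuil : Int) : Prop :=
  ∀ l ∈ liste_bloc_syn, l ≠ [] ∧ ∀ i ∈ l, i ≠ []
instance (liste_bloc_syn : List (List (List Int))) (taille_min_syn : Int) (seuil : Int) : Decidable (Pre_verification_bloc liste_bloc_syn taille_min_syn seuil) := by unfold Pre_verification_bloc; infer_instance
def pvWitness_verification_bloc : List (List (List Int)) × Int × Int := ([[[1], [2], [9]], [[4, 7]]], 1, 3)

-- When seuil < 0, taille_min_syn ≤ 0 and there is at least one block, A appends a phantom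
-- empty block per input block (prece = l[0][0] makes the first gene compare against itself)
-- that survives the size filter; B emits only the real segments, the intended output.
def D_verification_bloc (liste_bloc_syn : List (List (List Int))) (taille_min_syn : Int) (seuil : Int) : Prop :=
  seuil < 0 ∧ taille_min_syn ≤ 0 ∧ liste_bloc_syn ≠ []
instance (liste_bloc_syn : List (List (List Int))) (taille_min_syn : Int) (seuil : Int) : Decidable (D_verification_bloc liste_bloc_syn taille_min_syn seuil) := by unfold D_verification_bloc; infer_instance

def Spec_verification_bloc (liste_bloc_syn : List (List (List Int))) (taille_min_syn : Int) (seuil : Int) (out : List (List (List Int))) : Prop := ¬ D_verification_bloc liste_bloc_syn taille_min_syn seuil → out = verification_bloc_alt liste_bloc_syn taille_min_syn seuil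
instance (liste_bloc_syn : List (List (List Int))) (taille_min_syn : Int) (seuil : Int) (out : List (List (List Int))) : Decidable (Spec_verification_bloc liste_bloc_syn taille_min_syn seuil out) := by unfold Spec_verification_bloc; infer_instance

def pvDiffWitness_verification_bloc : List (List (List Int)) × Int × Int := ([[[1]]], 0, -1)
def pvDiffWitnessOut_verification_bloc : (List (List (List Int))) × (List (List (List Int))) := ([[], [[1]]], [[[1]]])

-- ===== CLAIM (what is proved, stated in full; the proofs are below) =====
def Claim_unchanged_verification_bloc : Prop := ∀ (liste_bloc_syn : List (List (List Int))) (taille_min_syn : Int) (seuil : Int), Dom_verification_bloc liste_bloc_syn taille_min_syn seuil → Pre_verification_bloc liste_bloc_syn taille_min_syn seuil → Spec_verification_bloc liste_bloc_syn taille_min_syn seuil (verification_bloc liste_bloc_syn taille_min_syn seuil)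
def Claim_changed_verification_bloc : Prop := Dom_verification_bloc (pvDiffWitness_verification_bloc.1) (pvDiffWitness_verification_bloc.2.1) (pvDiffWitness_verification_bloc.2.2) ∧ Pre_verification_bloc (pvDiffWitness_verification_bloc.1) (pvDiffWitness_verification_bloc.2.1) (pvDiffWitness_verification_bloc.2.2) ∧ D_verification_bloc (pvDiffWitness_verification_bloc.1) (pvDiffWitness_verification_bloc.2.1) (pvDiffWitness_verification_bloc.2.2) ∧ verification_bloc (pvDiffWitness_verification_bloc.1) (pvDiffWitness_verification_bloc.2.1) (pvDiffWitness_verification_bloc.2.2) = pvDiffWitnessOut_verification_bloc.1 ∧ verification_bloc_alt (pvDiffWitness_verification_bloc.1) (pvDiffWitness_verification_bloc.2.1) (pvDiffWitness_verification_bloc.2.2) = pvDiffWitnessOut_verification_bloc.2 ∧ pvDiffWitnessOut_verification_bloc.1 ≠ pvDiffWitnessOut_verification_bloc.2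
def Claim_exact_verification_bloc : Prop := ∀ (liste_bloc_syn : List (List (List Int))) (taille_min_syn : Int) (seuil : Int), Dom_verification_bloc liste_bloc_syn taille_min_syn seuil → Pre_verification_bloc liste_bloc_syn taille_min_syn seuil → D_verification_bloc liste_bloc_syn taille_min_syn seuil → verification_bloc liste_bloc_syn taille_min_syn seuil ≠ verification_bloc_alt liste_bloc_syn taille_min_syn seuil

-- ===== LEMMAS AND PROOFS =====

-- reference splitter: the list of segments A's inner loop produces from state (liste, prece)
def seg (s : Int) : Int → List (List Int) → List (List Int) → List (List (List Int))
  | _, liste, [] => [liste]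
  | prece, liste, i :: rest =>
      if i.headD 0 > prece + s then liste :: seg s (i.headD 0) [i] rest
      else seg s (i.headD 0) (liste ++ [i]) rest

-- break indices of a list of genes, threading the previous gene
def breaks0 (s : Int) : List Int → List (List Int) → List Nat
  | _, [] => []
  | prev, y :: r =>
      (if y.headD 0 > prev.headD 0 + s then [0] else []) ++ (breaks0 s y r).map (· + 1)

-- slices of l determined by consecutive cut pairs
def slicesOf (l : List (List Int)) : List Nat → List (List (List Int))
  | a :: b :: r => (l.drop a).take (b - a) :: slicesOf l (b :: r)
  | _ => []

-- per-block values of the two sides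
def ablk (s : Int) (l : List (List Int)) : List (List (List Int)) :=
  seg s ((l.headD []).headD 0) [] l

def bblk (t s : Int) (l : List (List Int)) : List (List (List Int)) :=
  (slicesOf l (altCuts s l)).filter (fun sg => decide ((sg.length : Int) ≥ t))

-- A's inner foldl computes acc ++ seg
theorem aRun (s : Int) (xs : List (List Int)) :
    ∀ (liste : List (List Int)) (prece : Int) (acc : List (List (List Int))),
      (let st := xs.foldl (fun (st : List (List Int) × Int × List (List (List Int))) i =>
        if ¬ (i.headD 0 > st.2.1 + s) then (st.1 ++ [i], i.headD 0, st.2.2)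
        else ([i], i.headD 0, st.2.2 ++ [st.1])) (liste, prece, acc)
      st.2.2 ++ [st.1]) = acc ++ seg s prece liste xs := by
  induction xs with
  | nil => intro liste prece acc; simp [seg]
  | cons i rest ih =>
      intro liste prece acc
      simp only [List.foldl_cons]
      have hseg : seg s prece liste (i :: rest) =
          if i.headD 0 > prece + s then liste :: seg s (i.headD 0) [i] rest
          else seg s (i.headD 0) (liste ++ [i]) rest := by simp only [seg]
      by_cases h : i.headD 0 > prece + s
      · rw [if_neg (by simpa using h)]
        rw [ih]
        rw [hseg, if_pos h]
        simp
      · rw [if_pos h]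
        rw [ih]
        rw [hseg, if_neg h]

theorem aBlock_eq (s : Int) (l : List (List Int)) (acc : List (List (List Int))) :
    aBlock s l acc = acc ++ ablk s l := by
  unfold aBlock ablk
  exact aRun s l [] ((l.headD []).headD 0) acc

-- A's while/del loop is a filter
theorem aFilter_eq (t : Int) (xs : List (List (List Int))) :
    aFilter t xs = xs.filter (fun b => decide ((b.length : Int) ≥ t)) := by
  induction xs with
  | nil => simp [aFilter]
  | cons b rest ih =>
      by_cases h : (b.length : Int) < t
      · have : ¬ ((b.length : Int) ≥ t) := by omega
        simp [aFilter, h, this, ih]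
      · have : (b.length : Int) ≥ t := by omega
        simp [aFilter, h, this, ih]

-- each slice of consecutive in-range cuts has length b - a, so Source B's 'b - a >= t' test
-- coincides with filtering slices by length; proved for the cut lists B builds
theorem zipFold (t : Int) (l : List (List Int)) :
    ∀ (cuts : List Nat) (acc : List (List (List Int))),
      (∀ p ∈ cuts.zip (cuts.drop 1), p.1 ≤ p.2 ∧ p.2 ≤ l.length) →
      ((cuts.zip (cuts.drop 1)).foldl (fun acc p =>
        if ((p.2 : Int) - (p.1 : Int)) ≥ t then acc ++ [(l.drop p.1).take (p.2 - p.1)] else acc) acc) =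
      acc ++ (slicesOf l cuts).filter (fun sg => decide ((sg.length : Int) ≥ t)) := by
  intro cuts
  induction cuts with
  | nil => intro acc _; simp [slicesOf]
  | cons a rest ih =>
      intro acc hle
      cases rest with
      | nil => simp [slicesOf]
      | cons b r =>
          simp only [List.drop_succ_cons, List.drop_zero, List.zip_cons_cons, List.foldl_cons]
          have hab : a ≤ b ∧ b ≤ l.length := by
            have := hle (a, b) (by simp)
            simpa using this
          have hlen : (((l.drop a).take (b - a)).length : Int) = (b : Int) - (a : Int) := by
            rw [List.length_take, List.length_drop]
            have : min (b - a) (l.length - a) = b - a := by omega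
            rw [this]
            omega
          have hrest : ∀ p ∈ (b :: r).zip ((b :: r).drop 1), p.1 ≤ p.2 ∧ p.2 ≤ l.length := by
            intro p hp
            apply hle
            simp only [List.drop_succ_cons, List.drop_zero] at hp ⊢
            exact List.mem_cons_of_mem _ hp
          rw [show ((b :: r).zip r) = ((b :: r).zip ((b :: r).drop 1)) by simp]
          rw [ih _ hrest]
          rw [show slicesOf l (a :: b :: r) =
              (l.drop a).take (b - a) :: slicesOf l (b :: r) from by simp only [slicesOf]]
          rw [List.filter_cons]
          by_cases h : ((b : Int) - (a : Int)) ≥ t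
          · rw [if_pos h, if_pos (by rw [hlen]; simpa using h)]
            simp
          · rw [if_neg h, if_neg (by rw [hlen]; simpa using h)]

-- pairwise-≤ cuts all bounded by n zip into in-range pairs
theorem pairwise_zip_le {cuts : List Nat} (h : cuts.Pairwise (· ≤ ·)) (n : Nat)
    (hmem : ∀ k ∈ cuts, k ≤ n) :
    ∀ p ∈ cuts.zip (cuts.drop 1), p.1 ≤ p.2 ∧ p.2 ≤ n := by
  induction cuts with
  | nil => simp
  | cons a rest ih =>
      cases rest with
      | nil => simp
      | cons b r =>
          intro p hp
          simp only [List.drop_succ_cons, List.drop_zero, List.zip_cons_cons, List.mem_cons] at hp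
          rcases hp with h1 | h2
          · subst h1
            exact ⟨List.rel_of_pairwise_cons h (by simp), hmem b (by simp)⟩
          · refine ih (List.Pairwise.of_cons h) (fun k hk => hmem k (List.mem_cons_of_mem _ hk)) p ?_
            simpa using h2

-- the cuts B builds are in range: every zipped pair satisfies p.1 ≤ p.2 ≤ len l
theorem altCuts_le (s : Int) (l : List (List Int)) :
    ∀ p ∈ (altCuts s l).zip ((altCuts s l).drop 1), p.1 ≤ p.2 ∧ p.2 ≤ l.length := by
  set F := ((List.range l.length).drop 1).filter
      (fun k => decide ((l.getD k []).headD 0 > (l.getD (k - 1) []).headD 0 + s)) with hF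
  have hsub : F.Sublist (List.range l.length) :=
    List.Sublist.trans List.filter_sublist (List.drop_sublist _ _)
  have hlt : F.Pairwise (· < ·) := List.pairwise_lt_range.sublist hsub
  have hmemF : ∀ k ∈ F, k < l.length := by
    intro k hk
    simpa using hsub.subset hk
  have hpw : (altCuts s l).Pairwise (· ≤ ·) := by
    unfold altCuts
    rw [← hF]
    rw [show ([0] ++ F ++ [l.length] : List Nat) = 0 :: (F ++ [l.length]) from by simp]
    rw [List.pairwise_cons]
    refine ⟨fun y _ => Nat.zero_le y, ?_⟩
    rw [List.pairwise_append]
    refine ⟨hlt.imp (fun h => Nat.le_of_lt h), List.pairwise_singleton _ _, ?_⟩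
    intro x hx y hy
    simp only [List.mem_singleton] at hy
    subst hy
    exact Nat.le_of_lt (hmemF x hx)
  have hmem : ∀ k ∈ altCuts s l, k ≤ l.length := by
    intro k hk
    unfold altCuts at hk
    rw [← hF] at hk
    rcases List.mem_append.mp hk with hk | hk
    · rcases List.mem_append.mp hk with hk | hk
      · simp only [List.mem_singleton] at hk; omega
      · exact Nat.le_of_lt (hmemF k hk)
    · simp only [List.mem_singleton] at hk; omega
  exact pairwise_zip_le hpw l.length hmem

theorem altBlock_eq (t s : Int) (l : List (List Int)) (acc : List (List (List Int))) :
    altBlock t s l acc = acc ++ bblk t s l := by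
  unfold altBlock bblk
  exact zipFold t l (altCuts s l) acc (altCuts_le s l)

-- filter of range characterisation of the break indices
theorem rangeFilter_eq (s : Int) :
    ∀ (ys : List (List Int)) (prev : List Int),
      (List.range ys.length).filter
        (fun k => decide ((ys.getD k []).headD 0 > ((prev :: ys).getD k []).headD 0 + s)) =
      breaks0 s prev ys := by
  intro ys
  induction ys with
  | nil => intro prev; simp [breaks0]
  | cons y r ih =>
      intro prev
      rw [show (y :: r).length = r.length + 1 from rfl, List.range_succ_eq_map,
          List.filter_cons, List.filter_map]
      have hpred : ((fun k => decide (((y :: r).getD k []).headD 0 > ((prev :: y :: r).getD k []).headD 0 + s)) ∘ Nat.succ)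
          = (fun k => decide ((r.getD k []).headD 0 > ((y :: r).getD k []).headD 0 + s)) := by
        funext k; simp [Function.comp]
      rw [hpred, ih y]
      have hm : List.map Nat.succ (breaks0 s y r) = List.map (fun x => x + 1) (breaks0 s y r) :=
        List.map_congr_left fun _ _ => rfl
      simp only [breaks0, hm, List.headD_eq_head?_getD, gt_iff_lt, List.getD_cons_zero, decide_eq_true_eq]
      split_ifs <;> simp

-- cuts of the port = [0] ++ shifted breaks0 ++ [length]
theorem altCuts_eq (s : Int) (x : List Int) (xs : List (List Int)) :
    altCuts s (x :: xs) = [0] ++ (breaks0 s x xs).map (· + 1) ++ [xs.length + 1] := by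
  unfold altCuts
  have hlen : (x :: xs).length = xs.length + 1 := rfl
  rw [hlen, List.range_succ_eq_map, List.drop_succ_cons, List.drop_zero, List.filter_map]
  have hpred : ((fun k => decide ((((x :: xs).getD k []).headD 0) > (((x :: xs).getD (k - 1) []).headD 0) + s)) ∘ Nat.succ)
      = (fun k => decide ((xs.getD k []).headD 0 > ((x :: xs).getD k []).headD 0 + s)) := by
    funext k; simp [Function.comp]
  rw [hpred, rangeFilter_eq s xs x]

-- take at the length of a prefix
theorem take_prefix_succ {α : Type} (B : List α) (x : α) (u : List α) :
    (B ++ x :: u).take (B.length + 1) = B ++ [x] := by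
  induction B with
  | nil => simp
  | cons b bs ih => simpa using ih

-- the central lemma: slicing at the shifted break indices = the reference splitter
theorem slices_seg (s : Int) :
    ∀ (xs : List (List Int)) (x : List Int) (A B : List (List Int)),
      slicesOf (A ++ B ++ x :: xs)
        ((A.length : Nat) :: (breaks0 s x xs).map (· + (A.length + B.length + 1))
          ++ [A.length + B.length + 1 + xs.length]) =
      seg s (x.headD 0) (B ++ [x]) xs := by
  intro xs
  induction xs with
  | nil =>
      intro x A B
      simp only [breaks0, List.map_nil, List.length_nil, Nat.add_zero, seg]
      simp only [List.singleton_append]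
      rw [show slicesOf (A ++ B ++ [x]) [A.length, A.length + B.length + 1]
            = [((A ++ B ++ [x]).drop A.length).take (A.length + B.length + 1 - A.length)]
          from by simp [slicesOf]]
      rw [show A ++ B ++ [x] = A ++ (B ++ x :: ([] : List (List Int))) from by simp]
      rw [List.drop_left]
      rw [show A.length + B.length + 1 - A.length = B.length + 1 from by omega]
      rw [take_prefix_succ]
  | cons y r ih =>
      intro x A B
      have hseg : seg s (x.headD 0) (B ++ [x]) (y :: r) =
          if y.headD 0 > x.headD 0 + s then (B ++ [x]) :: seg s (y.headD 0) [y] r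
          else seg s (y.headD 0) ((B ++ [x]) ++ [y]) r := by simp only [seg]
      by_cases hb : y.headD 0 > x.headD 0 + s
      · rw [hseg, if_pos hb]
        simp only [breaks0, if_pos hb, List.cons_append, List.nil_append, List.map_cons,
          List.map_map, List.length_cons, Nat.zero_add]
        have hmm : (breaks0 s y r).map ((fun k => k + (A.length + B.length + 1)) ∘ (fun k => k + 1))
            = (breaks0 s y r).map (fun k => k + (A.length + B.length + 1 + 1)) := by
          refine List.map_congr_left fun a _ => ?_
          simp only [Function.comp]; omega
        rw [hmm]
        rw [show A.length + B.length + 1 + (r.length + 1)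
              = A.length + B.length + 1 + 1 + r.length from by omega]
        simp only [slicesOf]
        have h1 : ((A ++ B ++ x :: y :: r).drop A.length).take (A.length + B.length + 1 - A.length)
            = B ++ [x] := by
          rw [show A ++ B ++ x :: y :: r = A ++ (B ++ x :: y :: r) from by simp]
          rw [List.drop_left, show A.length + B.length + 1 - A.length = B.length + 1 from by omega]
          rw [take_prefix_succ]
        rw [h1]
        have h2 := ih y (A ++ B ++ [x]) []
        simp only [List.append_nil, List.nil_append, List.length_nil, Nat.add_zero] at h2
        rw [show ((A ++ B ++ [x] : List (List Int))).length = A.length + B.length + 1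
              from by simp; omega] at h2
        rw [show A ++ B ++ [x] ++ y :: r = A ++ B ++ x :: y :: r from by simp] at h2
        simp only [List.cons_append] at h2
        rw [h2]
      · rw [hseg, if_neg hb]
        simp only [breaks0, if_neg hb, List.nil_append, List.map_map, List.length_cons]
        have hmm : (breaks0 s y r).map ((fun k => k + (A.length + B.length + 1)) ∘ (fun k => k + 1))
            = (breaks0 s y r).map (fun k => k + (A.length + (B.length + 1) + 1)) := by
          refine List.map_congr_left fun a _ => ?_
          simp only [Function.comp]; omega
        rw [hmm]
        rw [show A.length + B.length + 1 + (r.length + 1)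
              = A.length + (B.length + 1) + 1 + r.length from by omega]
        have h2 := ih y A (B ++ [x])
        rw [show ((B ++ [x] : List (List Int))).length = B.length + 1 from by simp] at h2
        rw [show A ++ (B ++ [x]) ++ y :: r = A ++ B ++ x :: y :: r from by simp] at h2
        simp only [List.cons_append] at h2 ⊢
        rw [h2]

-- B's slices of a nonempty block are exactly the real segments, filtered by size
theorem bblk_eq (t s : Int) (x : List Int) (xs : List (List Int)) :
    bblk t s (x :: xs) =
      (seg s (x.headD 0) [x] xs).filter (fun sg => decide ((sg.length : Int) ≥ t)) := by
  unfold bblk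
  rw [altCuts_eq]
  congr 1
  have hmain := slices_seg s xs x [] []
  simp only [List.nil_append, List.length_nil, Nat.zero_add, Nat.add_zero] at hmain
  rw [Nat.add_comm 1 xs.length] at hmain
  simp only [List.cons_append] at hmain ⊢
  simpa using hmain

-- A's segments of a nonempty block = the phantom empty head (iff seuil < 0) ++ the real segments
theorem ablk_eq_seg (s : Int) (x : List Int) (xs : List (List Int)) :
    ablk s (x :: xs) =
      (if s < 0 then [([] : List (List Int))] else []) ++ seg s (x.headD 0) [x] xs := by
  unfold ablk
  have hseg0 : seg s (((x :: xs).headD []).headD 0) [] (x :: xs) =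
      if x.headD 0 > x.headD 0 + s then [] :: seg s (x.headD 0) [x] xs
      else seg s (x.headD 0) [x] xs := by
    simp only [List.headD_cons, seg, List.nil_append]
  rw [hseg0]
  by_cases h : s < 0
  · rw [if_pos (by omega : x.headD 0 > x.headD 0 + s), if_pos h]; rfl
  · rw [if_neg (by omega : ¬ x.headD 0 > x.headD 0 + s), if_neg h]; rfl

-- per nonempty block: filtered A-segments = optional kept phantom ++ B's slices
theorem ablk_filter (t s : Int) (x : List Int) (xs : List (List Int)) :
    (ablk s (x :: xs)).filter (fun sg => decide ((sg.length : Int) ≥ t)) =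
      (if s < 0 ∧ (0 : Int) ≥ t then [([] : List (List Int))] else []) ++ bblk t s (x :: xs) := by
  rw [ablk_eq_seg, bblk_eq, List.filter_append]
  congr 1
  by_cases h : s < 0
  · by_cases h2 : (0 : Int) ≥ t
    · rw [if_pos h, if_pos ⟨h, h2⟩]
      simp [h2]
    · rw [if_pos h, if_neg (by tauto)]
      simp [h2]
  · rw [if_neg h, if_neg (by tauto)]
    simp

-- folding the blocks = flattening the per-block values
theorem foldA_eq (s : Int) :
    ∀ (lbs : List (List (List Int))) (acc : List (List (List Int))),
      lbs.foldl (fun acc l => aBlock s l acc) acc = acc ++ (lbs.map (ablk s)).flatten := by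
  intro lbs
  induction lbs with
  | nil => simp
  | cons l rest ih => intro acc; simp [aBlock_eq, ih]

theorem foldB_eq (t s : Int) :
    ∀ (lbs : List (List (List Int))) (acc : List (List (List Int))),
      lbs.foldl (fun acc l => altBlock t s l acc) acc = acc ++ (lbs.map (bblk t s)).flatten := by
  intro lbs
  induction lbs with
  | nil => simp
  | cons l rest ih => intro acc; simp [altBlock_eq, ih]

-- both results as flattened per-block lists
theorem A_flat (lbs : List (List (List Int))) (t s : Int) :
    verification_bloc lbs t s =
      (lbs.map (fun l => (ablk s l).filter (fun sg => decide ((sg.length : Int) ≥ t)))).flatten := by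
  unfold verification_bloc
  rw [foldA_eq, aFilter_eq]
  simp [List.filter_flatten, List.map_map, Function.comp_def]

theorem B_flat (lbs : List (List (List Int))) (t s : Int) :
    verification_bloc_alt lbs t s = (lbs.map (bblk t s)).flatten := by
  unfold verification_bloc_alt
  rw [foldB_eq]
  simp

-- ===== VERDICT (by name: the statements are the Claim_ definitions above) =====
theorem verification_bloc_spec : Claim_unchanged_verification_bloc := by
  intro lbs t s _ hPre hD
  rw [A_flat, B_flat]
  congr 1
  apply List.map_congr_left
  intro l hl
  obtain ⟨hne, -⟩ := hPre l hl
  obtain ⟨x, xs, rfl⟩ : ∃ x xs, l = x :: xs := by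
    cases l with
    | nil => exact absurd rfl hne
    | cons x xs => exact ⟨x, xs, rfl⟩
  rw [ablk_filter]
  have hlbs : lbs ≠ [] := List.ne_nil_of_mem hl
  have hnotD : ¬ (s < 0 ∧ (0 : Int) ≥ t) := by
    intro ⟨h1, h2⟩
    exact hD ⟨h1, by omega, hlbs⟩
  rw [if_neg hnotD]
  simp

theorem verification_bloc_changed : Claim_changed_verification_bloc := by
  unfold Claim_changed_verification_bloc; decide

theorem verification_bloc_tight : Claim_exact_verification_bloc := by
  intro lbs t s _ hPre hD
  obtain ⟨hs, ht, hne⟩ := hD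
  rw [A_flat, B_flat]
  intro heq
  have hlen := congrArg List.length heq
  simp only [List.length_flatten, List.map_map] at hlen
  have hsum : ∀ (L : List (List (List Int))), (∀ l ∈ L, l ≠ []) →
      ((L.map (fun l => (ablk s l).filter (fun sg => decide ((sg.length : Int) ≥ t)))).map List.length).sum
        = ((L.map (bblk t s)).map List.length).sum + L.length := by
    intro L
    induction L with
    | nil => intro _; simp
    | cons l rest ih =>
        intro hL
        obtain ⟨x, xs, rfl⟩ : ∃ x xs, l = x :: xs := by
          cases l with
          | nil => exact absurd rfl (hL [] (by simp))
          | cons x xs => exact ⟨x, xs, rfl⟩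
        simp only [List.map_cons, List.sum_cons, List.length_cons]
        rw [ablk_filter, if_pos ⟨hs, by omega⟩]
        rw [ih (fun l hl => hL l (List.mem_cons_of_mem _ hl))]
        simp
        omega
  have h1 := hsum lbs (fun l hl => (hPre l hl).1)
  simp only [List.map_map] at h1
  rw [hlen] at h1
  have : lbs.length = 0 := by omega
  exact hne (List.eq_nil_of_length_eq_zero this)
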